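-- pv_equiv track=rewrite | github.com/abdelatifsd/intramove.ai | news_data/news_newformat.py | new_magic
-- ===== SOURCE A (Python) =====
-- def new_magic(date_data:str):
--   split_data = date_data.split("\n")
--   split_data = [data for data in split_data if data != ""]
--
--   headlines = []
--   articles = []
--   dividers = []
--   for index in range(len(split_data)):
--     if (index+1) % 3 == 0:
--       split_data[index] = "divider"
--
--   split_data = [data for data in split_data if data != "divider"]
--
--   headlines = []
--   articles = []
--   for index, headline in enumerate(split_data):
--     if index % 2 == 0:
--       headlines.append(split_data[index])
--     else:
--       articles.append(split_data[index])
--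
--   return articles, headlines
-- ===== SOURCE B (Python) =====
-- def _triples(lines):
--     # recursive: consume lines three at a time; first of each triple is a
--     # headline, second an article, third (the old divider slot) is dropped
--     if len(lines) == 0:
--         return [], []
--     if len(lines) == 1:
--         return [], [lines[0]]
--     if len(lines) == 2:
--         return [lines[1]], [lines[0]]
--     arts, heads = _triples(lines[3:])
--     return [lines[1]] + arts, [lines[0]] + heads
--
-- def new_magic(date_data: str):
--     lines = [d for d in date_data.split("\n") if d != ""]
--     return _triples(lines)
-- ===== Notes on version B (the rewrite author's own statement) =====
-- stated objective: simpler
-- what changed: B replaces A's three staged passes (mark every third line with the sentinel 'divider', filter the sentinel out, then re-split the remainder by even/odd index) with a single recursive helper that consumes the non-empty lines three at a time: first of each triple -> headline, second -> article, third dropped.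
-- intended difference: On inputs whose non-empty lines contain a line literally equal to 'divider' at an index i with i % 3 != 2, A's sentinel filter silently deletes that real line (shifting all later lines), while B keeps it in its triple slot; B's value is intended because 'divider' is only A's internal sentinel, not part of the data. — e.g. on new_magic("divider"): A returns ([], []), B returns ([], ["divider"])
import Mathlib
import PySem

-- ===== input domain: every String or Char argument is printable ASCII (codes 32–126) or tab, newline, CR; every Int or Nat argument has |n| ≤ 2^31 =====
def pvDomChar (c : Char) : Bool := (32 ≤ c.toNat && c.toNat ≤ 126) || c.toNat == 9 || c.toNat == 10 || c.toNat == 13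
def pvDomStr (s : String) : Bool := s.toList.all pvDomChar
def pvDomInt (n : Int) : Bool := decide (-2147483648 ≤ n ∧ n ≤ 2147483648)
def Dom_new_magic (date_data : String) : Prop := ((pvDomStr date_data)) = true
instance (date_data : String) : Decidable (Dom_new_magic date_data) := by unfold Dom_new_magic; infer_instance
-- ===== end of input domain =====

-- B: one recursive helper consuming the non-empty lines three at a time (headline, article, dropped
-- slot) instead of A's mark-sentinel / filter / even-odd re-split stages (simpler decomposition, same cost).

-- ===== PORT A =====
-- date_data.split("\n"): sep is the nonempty literal "\n", so split? always returns some.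
def new_magic (date_data : String) : List String × List String :=
  let split_data := (PySem.Str.split? date_data "\n").getD []
  let split_data := split_data.filter (fun d => d ≠ "")
  -- for index in range(len(split_data)): if (index+1) % 3 == 0: split_data[index] = "divider"
  let split_data := (PySem.List.enumerate split_data).map
      (fun p => if (p.1 + 1) % 3 == 0 then "divider" else p.2)
  let split_data := split_data.filter (fun d => d ≠ "divider")
  -- for index, headline in enumerate(split_data): even -> headlines, odd -> articles
  let r := (PySem.List.enumerate split_data).foldl
      (fun (acc : List String × List String) p =>
        if p.1 % 2 == 0 then (acc.1 ++ [p.2], acc.2) else (acc.1, acc.2 ++ [p.2]))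
      ([], [])
  (r.2, r.1)

-- ===== PORT B =====
-- _triples: recursion on the line list, three lines (headline, article, dropped) per step
def pvTriples : List String → List String × List String
  | [] => ([], [])
  | [h] => ([], [h])
  | [h, a] => ([a], [h])
  | h :: a :: _ :: t => let p := pvTriples t; (a :: p.1, h :: p.2)

def new_magic_alt (date_data : String) : List String × List String :=
  pvTriples (((PySem.Str.split? date_data "\n").getD []).filter (fun d => d ≠ ""))

-- ===== PRECONDITION & SPEC =====
-- On inputs whose non-empty lines contain a line literally equal to "divider" at an index i with
-- i % 3 ≠ 2, A's sentinel filter silently deletes that real line (shifting all later lines), while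
-- B keeps it in its triple slot; B's value is intended because "divider" is only A's internal
-- sentinel, not part of the data.
def D_new_magic (date_data : String) : Prop :=
  (((PySem.Chars.splitOn date_data.toList ['\n']).filter (fun l => l ≠ [])).zipIdx.any
      (fun p => p.2 % 3 != 2 && p.1 == "divider".toList)) = true
instance (date_data : String) : Decidable (D_new_magic date_data) := by unfold D_new_magic; infer_instance

def Spec_new_magic (date_data : String) (out : List String × List String) : Prop :=
  ¬ D_new_magic date_data → out = new_magic_alt date_data
instance (date_data : String) (out : List String × List String) : Decidable (Spec_new_magic date_data out) := by unfold Spec_new_magic; infer_instance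

def pvDiffWitness_new_magic : String := "divider"
def pvDiffWitnessOut_new_magic : (List String × List String) × (List String × List String) :=
  (([], []), ([], ["divider"]))

-- ===== CLAIM (what is proved, stated in full; the proofs are below) =====
def Claim_unchanged_new_magic : Prop := ∀ (date_data : String), Dom_new_magic date_data → Spec_new_magic date_data (new_magic date_data)
def Claim_changed_new_magic : Prop := Dom_new_magic (pvDiffWitness_new_magic) ∧ D_new_magic (pvDiffWitness_new_magic) ∧ new_magic (pvDiffWitness_new_magic) = pvDiffWitnessOut_new_magic.1 ∧ new_magic_alt (pvDiffWitness_new_magic) = pvDiffWitnessOut_new_magic.2 ∧ pvDiffWitnessOut_new_magic.1 ≠ pvDiffWitnessOut_new_magic.2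
def Claim_exact_new_magic : Prop := ∀ (date_data : String), Dom_new_magic date_data → D_new_magic date_data → new_magic date_data ≠ new_magic_alt date_data

-- ===== LEMMAS AND PROOFS =====

-- evens/odds of a list, flag-driven: eo true = elements at even positions, eo false = odd positions
def pvEo (b : Bool) : List String → List String
  | [] => []
  | a :: t => if b then a :: pvEo (!b) t else pvEo (!b) t

-- the list A keeps after marking phase-2 elements and filtering the sentinel, assuming no genuine
-- "divider" lines; phase argument r ∈ {0,1,2}
def pvKeep : Nat → List String → List String
  | _, [] => []
  | r, x :: t => if r == 2 then pvKeep 0 t else x :: pvKeep ((r + 1) % 3) t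

-- phase-indexed classification (proof device): (headlines, articles) from phase r ∈ {0,1,2}
def pvPicks : Nat → List String → List String × List String
  | _, [] => ([], [])
  | r, x :: t =>
      let p := pvPicks ((r + 1) % 3) t
      if r == 0 then (x :: p.1, p.2) else if r == 1 then (p.1, x :: p.2) else p

-- B's recursion agrees with the phase-0 classification (swapped components)
theorem pvTriplesEq (L : List String) :
    pvTriples L = ((pvPicks 0 L).2, (pvPicks 0 L).1) := by
  induction L using pvTriples.induct with
  | case1 => simp [pvTriples, pvPicks]
  | case2 h => simp [pvTriples, pvPicks]
  | case3 h a => simp [pvTriples, pvPicks]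
  | case4 h a x t ih => simp [pvTriples, pvPicks, ih]

-- the Char-level line list of D_new_magic equals the String-level line list of the ports
theorem pvLinesEq (d : String) :
    (PySem.Chars.splitOn d.toList ['\n']).filter (fun l => l ≠ [])
      = (((PySem.Str.split? d "\n").getD []).filter (fun x => x ≠ "")).map String.toList := by
  have h1 : Option.map (fun x => List.map String.toList x) (PySem.Str.split? d "\n")
      = PySem.Chars.split? d.toList "\n".toList := PySem.Str.split?_map d "\n"
  have h2 : PySem.Chars.split? d.toList ['\n'] = some (PySem.Chars.splitOn d.toList ['\n']) := by
    simp [PySem.Chars.split?]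
  have h3 : ("\n" : String).toList = ['\n'] := by decide
  rw [h3, h2] at h1
  obtain ⟨ps, hps, hmap⟩ := Option.map_eq_some_iff.mp h1
  rw [hps, Option.getD_some, ← hmap, List.filter_map]
  congr 1
  apply List.filter_congr
  intro x _
  simp [Function.comp]

-- inside D_: there is a genuine "divider" line at a kept phase
theorem pvDexists (d : String) (hD : D_new_magic d) :
    ∃ p ∈ PySem.List.enumerate (((PySem.Str.split? d "\n").getD []).filter (fun x => x ≠ "")) 0,
      p.1 % 3 ≠ 2 ∧ p.2 = "divider" := by
  unfold D_new_magic at hD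
  rw [pvLinesEq, List.any_eq_true] at hD
  obtain ⟨q, hq, hpred⟩ := hD
  obtain ⟨x, i⟩ := q
  obtain ⟨-, hilt, hxi⟩ := List.mem_zipIdx hq
  simp only [Nat.sub_zero, List.getElem_map] at hxi
  simp only [Nat.zero_add, List.length_map] at hilt
  simp only [bne_iff_ne, ne_eq, beq_iff_eq, Bool.and_eq_true] at hpred
  refine ⟨((i : Int), (((PySem.Str.split? d "\n").getD []).filter (fun x => x ≠ ""))[i]), ?_, ?_, ?_⟩
  · rw [PySem.List.mem_enumerate_iff]
    exact ⟨i, hilt, by simp⟩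
  · simpa using fun h => hpred.1 (by omega)
  · apply String.toList_inj.mp
    rw [← hxi, hpred.2]

theorem pvFoldA (L : List String) : ∀ (h a : List String) (s : Int), 0 ≤ s →
    (PySem.List.enumerate L s).foldl
      (fun (acc : List String × List String) p =>
        if p.1 % 2 == 0 then (acc.1 ++ [p.2], acc.2) else (acc.1, acc.2 ++ [p.2]))
      (h, a)
    = (h ++ pvEo (s % 2 == 0) L, a ++ pvEo (!(s % 2 == 0)) L) := by
  induction L with
  | nil => intro h a s _; simp [PySem.List.enumerate_nil, pvEo]
  | cons x t ih =>
    intro h a s hs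
    rw [PySem.List.enumerate_cons, List.foldl_cons]
    by_cases h2 : s % 2 = 0
    · have happ : (if ((s, x) : Int × String).1 % 2 == 0 then
          (((h, a) : List String × List String).1 ++ [((s, x) : Int × String).2], (h, a).2)
          else ((h, a).1, (h, a).2 ++ [((s, x) : Int × String).2])) = (h ++ [x], a) := by
        simp [h2]
      rw [happ, ih (h ++ [x]) a (s + 1) (by omega)]
      have e1 : ((s + 1) % 2 == 0) = false := by simp; omega
      have e0 : (s % 2 == 0) = true := by simp [h2]
      simp [e0, e1, pvEo]
    · have ho : s % 2 = 1 := by omega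
      have happ : (if ((s, x) : Int × String).1 % 2 == 0 then
          (((h, a) : List String × List String).1 ++ [((s, x) : Int × String).2], (h, a).2)
          else ((h, a).1, (h, a).2 ++ [((s, x) : Int × String).2])) = (h, a ++ [x]) := by
        simp [ho]
      rw [happ, ih h (a ++ [x]) (s + 1) (by omega)]
      have e1 : ((s + 1) % 2 == 0) = true := by simp; omega
      have e0 : (s % 2 == 0) = false := by simp [ho]
      simp [e0, e1, pvEo]

theorem pvMarkFilter (L : List String) : ∀ (s : Int), 0 ≤ s →
    (∀ p ∈ PySem.List.enumerate L s, p.1 % 3 ≠ 2 → p.2 ≠ "divider") →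
    ((PySem.List.enumerate L s).map
        (fun p => if (p.1 + 1) % 3 == 0 then "divider" else p.2)).filter (fun d => d ≠ "divider")
    = pvKeep (s % 3).toNat L := by
  induction L with
  | nil => intro s _ _; simp [PySem.List.enumerate_nil, pvKeep]
  | cons x t ih =>
    intro s hs hnd
    rw [PySem.List.enumerate_cons]
    have htail : ∀ p ∈ PySem.List.enumerate t (s + 1), p.1 % 3 ≠ 2 → p.2 ≠ "divider" := by
      intro p hp; exact hnd p (by rw [PySem.List.enumerate_cons]; exact List.mem_cons_of_mem _ hp)
    by_cases h2 : s % 3 = 2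
    · have e1 : (s + 1) % 3 = 0 := by omega
      simp only [List.map_cons, List.filter_cons, ih (s + 1) (by omega) htail, e1]
      simp [pvKeep, h2]
    · have hx : x ≠ "divider" := by
        refine hnd (s, x) ?_ h2
        rw [PySem.List.enumerate_cons]; exact List.mem_cons_self
      have e0 : ((s + 1) % 3 == 0) = false := by simp; omega
      have e1 : ((s + 1) % 3).toNat = ((s % 3).toNat + 1) % 3 := by omega
      simp only [List.map_cons, e0, List.filter_cons, ih (s + 1) (by omega) htail, e1]
      have hr : (s % 3).toNat = 0 ∨ (s % 3).toNat = 1 := by omega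
      rcases hr with hr | hr <;> simp [pvKeep, hr, hx]

-- bridge: even/odd split of the kept list = the phase-3 classification
theorem pvEoKeep (L : List String) :
    (pvEo true (pvKeep 0 L) = (pvPicks 0 L).1 ∧ pvEo false (pvKeep 0 L) = (pvPicks 0 L).2)
    ∧ (pvEo false (pvKeep 1 L) = (pvPicks 1 L).1 ∧ pvEo true (pvKeep 1 L) = (pvPicks 1 L).2)
    ∧ (pvEo true (pvKeep 2 L) = (pvPicks 2 L).1 ∧ pvEo false (pvKeep 2 L) = (pvPicks 2 L).2) := by
  induction L with
  | nil => simp [pvKeep, pvPicks, pvEo]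
  | cons x t ih =>
    obtain ⟨⟨ih01, ih02⟩, ⟨ih11, ih12⟩, ⟨ih21, ih22⟩⟩ := ih
    refine ⟨⟨?_, ?_⟩, ⟨?_, ?_⟩, ⟨?_, ?_⟩⟩ <;>
      simp [pvKeep, pvPicks, pvEo, ih01, ih02, ih11, ih12, ih21, ih22]

theorem pvLenLe (L : List String) : ∀ (s : Int), 0 ≤ s →
    (((PySem.List.enumerate L s).map (fun p => if (p.1 + 1) % 3 == 0 then "divider" else p.2)).filter
        (fun x => x ≠ "divider")).length
      ≤ (pvPicks (s % 3).toNat L).1.length + (pvPicks (s % 3).toNat L).2.length := by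
  induction L with
  | nil => intro s _; simp [PySem.List.enumerate_nil, pvPicks]
  | cons x t ih =>
    intro s hs
    rw [PySem.List.enumerate_cons]
    have hle := ih (s + 1) (by omega)
    have h3 : s % 3 = 0 ∨ s % 3 = 1 ∨ s % 3 = 2 := by omega
    rcases h3 with h0 | h0 | h0
    · have e1 : ¬ (3 : Int) ∣ (s + 1) := by omega
      have e2 : (s + 1) % 3 = 1 := by omega
      rw [e2] at hle
      by_cases hx : x = "divider" <;>
        simp [e1, hx, h0, pvPicks] at hle ⊢ <;> omega
    · have e1 : ¬ (3 : Int) ∣ (s + 1) := by omega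
      have e2 : (s + 1) % 3 = 2 := by omega
      rw [e2] at hle
      by_cases hx : x = "divider" <;>
        simp [e1, hx, h0, pvPicks] at hle ⊢ <;> omega
    · have e1 : (3 : Int) ∣ (s + 1) := by omega
      have e2 : (s + 1) % 3 = 0 := by omega
      rw [e2] at hle
      simp [e1, h0, pvPicks] at hle ⊢
      omega

theorem pvEoLen (M : List String) : ∀ b, (pvEo b M).length + (pvEo (!b) M).length = M.length := by
  induction M with
  | nil => intro b; simp [pvEo]
  | cons x t ih =>
    intro b
    cases b
    · have := ih true; simp [pvEo] at this ⊢; omega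
    · have := ih false; simp [pvEo] at this ⊢; omega

theorem pvLenLt (L : List String) : ∀ (s : Int), 0 ≤ s →
    (∃ p ∈ PySem.List.enumerate L s, p.1 % 3 ≠ 2 ∧ p.2 = "divider") →
    (((PySem.List.enumerate L s).map (fun p => if (p.1 + 1) % 3 == 0 then "divider" else p.2)).filter
        (fun x => x ≠ "divider")).length
      < (pvPicks (s % 3).toNat L).1.length + (pvPicks (s % 3).toNat L).2.length := by
  induction L with
  | nil => intro s _ hex; simp [PySem.List.enumerate_nil] at hex
  | cons x t ih =>
    intro s hs hex
    rw [PySem.List.enumerate_cons]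
    obtain ⟨p, hp, hp3, hpd⟩ := hex
    rw [PySem.List.enumerate_cons, List.mem_cons] at hp
    have hle := pvLenLe t (s + 1) (by omega)
    have h3 : s % 3 = 0 ∨ s % 3 = 1 ∨ s % 3 = 2 := by omega
    rcases hp with hp | hp
    · -- witness is the head: s % 3 ≠ 2 and x = "divider"
      have hp1 : p.1 = s := by rw [hp]
      have hpd' : x = "divider" := by rw [hp] at hpd; exact hpd
      subst hpd'
      have hs3 : ¬ s % 3 = 2 := by rw [hp1] at hp3; exact hp3
      rcases h3 with h0 | h0 | h0
      · have e1 : ¬ (3 : Int) ∣ (s + 1) := by omega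
        have e2 : (s + 1) % 3 = 1 := by omega
        rw [e2] at hle
        simp [e1, h0, pvPicks] at hle ⊢
        omega
      · have e1 : ¬ (3 : Int) ∣ (s + 1) := by omega
        have e2 : (s + 1) % 3 = 2 := by omega
        rw [e2] at hle
        simp [e1, h0, pvPicks] at hle ⊢
        omega
      · exact absurd h0 hs3
    · -- witness is in the tail
      have ihx := ih (s + 1) (by omega) ⟨p, hp, hp3, hpd⟩
      rcases h3 with h0 | h0 | h0
      · have e1 : ¬ (3 : Int) ∣ (s + 1) := by omega
        have e2 : (s + 1) % 3 = 1 := by omega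
        rw [e2] at ihx
        by_cases hx : x = "divider" <;>
          simp [e1, hx, h0, pvPicks] at ihx ⊢ <;> omega
      · have e1 : ¬ (3 : Int) ∣ (s + 1) := by omega
        have e2 : (s + 1) % 3 = 2 := by omega
        rw [e2] at ihx
        by_cases hx : x = "divider" <;>
          simp [e1, hx, h0, pvPicks] at ihx ⊢ <;> omega
      · have e1 : (3 : Int) ∣ (s + 1) := by omega
        have e2 : (s + 1) % 3 = 0 := by omega
        rw [e2] at ihx
        simp [e1, h0, pvPicks] at ihx ⊢
        omega

-- ===== VERDICT (by name: the statement is the Claim_ definition above) =====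
theorem new_magic_spec : Claim_unchanged_new_magic := by
  intro d _ hD
  unfold new_magic new_magic_alt
  set L : List String := ((PySem.Str.split? d "\n").getD []).filter (fun x => x ≠ "") with hL
  have hnd : ∀ p ∈ PySem.List.enumerate L 0, p.1 % 3 ≠ 2 → p.2 ≠ "divider" := by
    intro p hp h2 hdv
    apply hD
    unfold D_new_magic
    rw [pvLinesEq, List.any_eq_true]
    rw [PySem.List.mem_enumerate_iff] at hp
    obtain ⟨k, hk, hpk⟩ := hp
    refine ⟨(L[k].toList, k), ?_, ?_⟩
    · have hlen : k < (L.map String.toList).zipIdx.length := by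
        simp [hk]
      have hz := List.getElem_zipIdx (l := L.map String.toList) (i := k) (j := 0) hlen
      rw [List.getElem_map] at hz
      have hmem := List.getElem_mem hlen
      rw [hz] at hmem
      show (L[k].toList, k) ∈ (List.map String.toList L).zipIdx
      simpa using hmem
    · have hk3 : ¬ (k : Int) % 3 = 2 := by rw [hpk] at h2; simpa using h2
      have hk3' : k % 3 ≠ 2 := by omega
      have hdv' : L[k] = "divider" := by rw [hpk] at hdv; simpa using hdv
      simp [hk3', hdv']
  have hmf := pvMarkFilter L 0 (by omega) hnd
  simp only [show ((0 : Int) % 3).toNat = 0 by norm_num] at hmf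
  have hfa := pvFoldA (pvKeep 0 L) [] [] 0 (by omega)
  simp only [show ((0 : Int) % 2 == 0) = true by decide] at hfa
  obtain ⟨⟨h1, h2⟩, _, _⟩ := pvEoKeep L
  simp only [← hL, hmf, hfa, pvTriplesEq, List.nil_append, h1]
  simp [h2]

theorem new_magic_changed : Claim_changed_new_magic := by
  unfold Claim_changed_new_magic; decide

theorem new_magic_tight : Claim_exact_new_magic := by
  intro d _ hDd heq
  have hex := pvDexists d hDd
  revert heq
  unfold new_magic new_magic_alt
  set L : List String := List.filter (fun x => decide (x ≠ "")) ((PySem.Str.split? d "\n").getD []) with hL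
  intro heq
  have hfa := pvFoldA (((PySem.List.enumerate L).map
      (fun p => if (p.1 + 1) % 3 == 0 then "divider" else p.2)).filter (fun x => x ≠ "divider"))
      [] [] 0 (by omega)
  simp only [show ((0 : Int) % 2 == 0) = true by decide] at hfa
  simp only [← hL, hfa, pvTriplesEq, List.nil_append] at heq
  rw [Prod.mk.injEq] at heq
  obtain ⟨hq1, hq2⟩ := heq
  have hl1 := congrArg List.length hq1
  have hl2 := congrArg List.length hq2
  have hsum := pvEoLen (((PySem.List.enumerate L).map
      (fun p => if (p.1 + 1) % 3 == 0 then "divider" else p.2)).filter (fun x => x ≠ "divider")) true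
  have hlt := pvLenLt L 0 (by omega) (by simpa [hL] using hex)
  simp only [show ((0 : Int) % 3).toNat = 0 by norm_num] at hlt
  simp only [Bool.not_true] at hsum hl1 hl2
  omega
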